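-- pv_equiv track=rewrite | github.com/snickerz99m/BoomSQL | core/sql_injection_engine.py | detect_file_access
-- ===== SOURCE A (Python) =====
-- def detect_file_access(payload: str, response: str) -> bool:
--     """Detect file system access capabilities"""
--     file_indicators = [
--         'load_file', 'into outfile', 'into dumpfile',
--         'xp_cmdshell', 'sp_oacreate', 'sp_oamethod',
--         'readfile', 'writefile', 'sys_exec',
--         'pg_read_file', 'pg_stat_file'
--     ]
--
--     for indicator in file_indicators:
--         if indicator.lower() in payload.lower():
--             return True
--
--     return False
-- ===== SOURCE B (Python) =====
-- _FILE_INDICATORS = [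
--     'load_file', 'into outfile', 'into dumpfile',
--     'xp_cmdshell', 'sp_oacreate', 'sp_oamethod',
--     'readfile', 'writefile', 'sys_exec',
--     'pg_read_file', 'pg_stat_file'
-- ]
--
--
-- def _build_trie():
--     """Build a character trie of all indicators; key None marks a word end."""
--     root = {}
--     for ind in _FILE_INDICATORS:
--         node = root
--         for ch in ind:
--             node = node.setdefault(ch, {})
--         node[None] = True
--     return root
--
--
-- _TRIE = _build_trie()
--
--
-- def detect_file_access(payload: str, response: str) -> bool:
--     """Detect file system access capabilities (trie automaton scan)."""
--     lowered = payload.lower()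
--     n = len(lowered)
--     for i in range(n):
--         node = _TRIE
--         for j in range(i, n):
--             node = node.get(lowered[j])
--             if node is None:
--                 break
--             if None in node:
--                 return True
--     return False
-- ===== Notes on version B (the rewrite author's own statement) =====
-- stated objective: alternative
-- what changed: B builds a character trie of the 11 indicators once and detects a hit with a single automaton-style scan (walk the trie from each start position), instead of A's eleven separate 'indicator in payload' substring passes with early return.
import Mathlib
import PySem

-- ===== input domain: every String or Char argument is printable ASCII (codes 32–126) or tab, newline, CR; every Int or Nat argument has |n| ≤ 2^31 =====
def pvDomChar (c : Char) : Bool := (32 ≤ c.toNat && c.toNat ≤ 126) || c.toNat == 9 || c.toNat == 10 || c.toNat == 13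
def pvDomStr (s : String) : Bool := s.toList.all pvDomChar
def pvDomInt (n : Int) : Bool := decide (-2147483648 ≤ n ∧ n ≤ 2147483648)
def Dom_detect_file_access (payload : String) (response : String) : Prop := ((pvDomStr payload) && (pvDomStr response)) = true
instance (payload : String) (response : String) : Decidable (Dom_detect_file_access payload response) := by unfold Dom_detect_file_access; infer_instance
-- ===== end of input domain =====

-- B builds a character trie of the indicators once and detects a hit with one automaton-style
-- scan of the lowered payload, instead of A's eleven separate substring passes (objective: alternative).

-- ===== PORT A =====
def fileIndicators_A : List String :=
  ["load_file", "into outfile", "into dumpfile",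
   "xp_cmdshell", "sp_oacreate", "sp_oamethod",
   "readfile", "writefile", "sys_exec",
   "pg_read_file", "pg_stat_file"]

-- A's for-loop with early return, over the indicator list
def detectLoop_A (pl : List Char) : List String → Bool
  | [] => false
  | ind :: rest =>
    if PySem.Chars.isIn (PySem.Chars.lower ind.toList) pl then true
    else detectLoop_A pl rest

def detect_file_access (payload : String) (response : String) : Bool :=
  detectLoop_A (PySem.Chars.lower payload.toList) fileIndicators_A

-- ===== PORT B =====
def fileIndicators_B : List String :=
  ["load_file", "into outfile", "into dumpfile",
   "xp_cmdshell", "sp_oacreate", "sp_oamethod",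
   "readfile", "writefile", "sys_exec",
   "pg_read_file", "pg_stat_file"]

-- Python's trie of nested dicts, as a first-child / next-sibling tree; the Bool is the
-- Python 'None in node' end-of-word marker on the node entered by the last character.
inductive Trie where
  | nil : Trie
  | node : Char → Bool → Trie → Trie → Trie
deriving DecidableEq, Repr

-- insert one word (Python's inner setdefault loop of _build_trie)
def trieInsert : Trie → List Char → Trie
  | t, [] => t
  | .nil, c :: rest => .node c rest.isEmpty (trieInsert .nil rest) .nil
  | .node c' term ch sib, c :: rest =>
      if c' = c then .node c' (term || rest.isEmpty) (trieInsert ch rest) sib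
      else .node c' term ch (trieInsert sib (c :: rest))
termination_by t l => sizeOf t + sizeOf l

-- _TRIE = _build_trie()
def trieRoot : Trie := fileIndicators_B.foldl (fun t ind => trieInsert t ind.toList) .nil

-- Python B's inner loop: walk the trie along the characters, break on a missing child,
-- return True as soon as an end-of-word marker is met (Trie.nil ≡ dict lookup miss).
def runFrom : Trie → List Char → Bool
  | .nil, _ => false
  | .node _ _ _ _, [] => false
  | .node c term ch sib, x :: rest =>
      if c = x then term || runFrom ch rest else runFrom sib (x :: rest)
termination_by t l => sizeOf t + sizeOf l

def detect_file_access_alt (payload : String) (response : String) : Bool :=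
  let lowered := PySem.Chars.lower payload.toList
  (List.range lowered.length).any fun i => runFrom trieRoot (lowered.drop i)

-- ===== PRECONDITION & SPEC =====
def Spec_detect_file_access (payload : String) (response : String) (out : Bool) : Prop := out = detect_file_access_alt payload response
instance (payload : String) (response : String) (out : Bool) : Decidable (Spec_detect_file_access payload response out) := by unfold Spec_detect_file_access; infer_instance

-- ===== CLAIM (what is proved, stated in full; the proofs are below) =====
def Claim_equal_detect_file_access : Prop := ∀ (payload : String) (response : String), Dom_detect_file_access payload response → Spec_detect_file_access payload response (detect_file_access payload response)

-- ===== LEMMAS AND PROOFS =====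

-- A's early-return loop is List.any
theorem detectLoop_A_eq_any (pl : List Char) (l : List String) :
    detectLoop_A pl l = l.any (fun ind => PySem.Chars.isIn (PySem.Chars.lower ind.toList) pl) := by
  induction l with
  | nil => rfl
  | cons ind rest ih =>
    rw [detectLoop_A, List.any_cons, ih]
    by_cases h : PySem.Chars.isIn (PySem.Chars.lower ind.toList) pl = true
    · simp [h]
    · simp [h]

-- all indicators are lowercase and nonempty
theorem indicators_norm :
    ∀ ind ∈ fileIndicators_A,
      PySem.Chars.lower ind.toList = ind.toList ∧ ind.toList ≠ [] := by
  decide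

-- for a nonempty pattern, 'sub in s' equals a scan over the positions of s
theorem isIn_eq_scan (sub s : List Char) (hsub : sub ≠ []) :
    PySem.Chars.isIn sub s =
      (List.range s.length).any fun i => PySem.Chars.startswith (s.drop i) sub := by
  by_cases h : PySem.Chars.isIn sub s = true
  · rw [h]
    obtain ⟨j, hj⟩ := (PySem.Chars.exists_prefix_drop_iff_isIn sub s).2 h
    have hjlt : j < s.length := by
      by_contra hge
      have : s.drop j = [] := List.drop_eq_nil_of_le (le_of_not_gt hge)
      rw [this] at hj
      exact hsub (List.prefix_nil.mp hj)
    symm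
    simp only [List.any_eq_true, List.mem_range]
    exact ⟨j, hjlt, (PySem.Chars.startswith_iff _ _).2 hj⟩
  · rw [Bool.not_eq_true] at h
    rw [h]
    symm
    rw [List.any_eq_false]
    intro i _
    rw [← Bool.not_eq_false, Bool.not_eq_false]
    intro hst
    exact absurd
      ((PySem.Chars.exists_prefix_drop_iff_isIn sub s).1
        ⟨i, (PySem.Chars.startswith_iff _ _).1 hst⟩)
      (by simp [h])

-- the words stored in a triein a trie, and the characters of a sibling chain
def wordsOf : Trie → List (List Char)
  | .nil => []
  | .node c term ch sib =>
      (if term then [[c]] else []) ++ (wordsOf ch).map (c :: ·) ++ wordsOf sib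

def chainChars : Trie → List Char
  | .nil => []
  | .node c _ _ sib => c :: chainChars sib

-- well-formedness: no two siblings share a character (true of dict-built tries)
def trieWF : Trie → Bool
  | .nil => true
  | .node c _ ch sib => !(chainChars sib).contains c && trieWF ch && trieWF sib

theorem wordsOf_head (t : Trie) :
    ∀ w ∈ wordsOf t, ∃ hd tl, w = hd :: tl ∧ hd ∈ chainChars t := by
  induction t with
  | nil => intro w hw; simp [wordsOf] at hw
  | node c term ch sib ihch ihsib =>
    intro w hw
    simp only [wordsOf, List.mem_append, List.mem_map] at hw
    rcases hw with (hw | ⟨w', _, rfl⟩) | hw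
    · have : w = [c] := by
        by_cases h : term = true
        · simpa [h] using hw
        · simp [h] at hw
      exact ⟨c, [], this, by simp [chainChars]⟩
    · exact ⟨c, w', rfl, by simp [chainChars]⟩
    · obtain ⟨hd, tl, rfl, hmem⟩ := ihsib w hw
      exact ⟨hd, tl, rfl, by simp [chainChars, hmem]⟩

-- the automaton walk accepts exactly when some stored word is a prefix of the input
theorem runFrom_iff (t : Trie) (l : List Char) (hwf : trieWF t = true) :
    runFrom t l = true ↔ ∃ w ∈ wordsOf t, w <+: l := by
  induction t generalizing l with
  | nil => simp [runFrom, wordsOf]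
  | node c term ch sib ihch ihsib =>
    simp only [trieWF, Bool.and_eq_true, Bool.not_eq_true', List.contains_eq_mem,
      decide_eq_false_iff_not] at hwf
    obtain ⟨⟨hc, hch⟩, hsib⟩ := hwf
    cases l with
    | nil =>
      rw [runFrom]
      simp only [Bool.false_eq_true, false_iff]
      rintro ⟨w, hw, hpre⟩
      obtain ⟨hd, tl, rfl, -⟩ := wordsOf_head _ w hw
      exact absurd (List.prefix_nil.mp hpre) (by simp)
    | cons x rest =>
      rw [runFrom]
      by_cases hcx : c = x
      · subst hcx
        rw [if_pos rfl]
        simp only [Bool.or_eq_true]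
        constructor
        · rintro (hterm | hrun)
          · exact ⟨[c], by simp [wordsOf, hterm], ⟨rest, rfl⟩⟩
          · obtain ⟨w, hw, hpre⟩ := (ihch rest hch).1 hrun
            refine ⟨c :: w, ?_, List.cons_prefix_cons.mpr ⟨rfl, hpre⟩⟩
            simp only [wordsOf, List.mem_append, List.mem_map]
            exact Or.inl (Or.inr ⟨w, hw, rfl⟩)
        · rintro ⟨w, hw, hpre⟩
          simp only [wordsOf, List.mem_append, List.mem_map] at hw
          rcases hw with (hw | ⟨w', hw', rfl⟩) | hw
          · refine Or.inl ?_
            by_cases h : term = true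
            · exact h
            · simp [h] at hw
          · exact Or.inr ((ihch rest hch).2 ⟨w', hw', (List.cons_prefix_cons.mp hpre).2⟩)
          · obtain ⟨hd, tl, rfl, hmem⟩ := wordsOf_head _ w hw
            exact absurd ((List.cons_prefix_cons.mp hpre).1 ▸ hmem) hc
      · rw [if_neg hcx]
        rw [ihsib (x :: rest) hsib]
        constructor
        · rintro ⟨w, hw, hpre⟩
          refine ⟨w, ?_, hpre⟩
          simp only [wordsOf, List.mem_append]
          exact Or.inr hw
        · rintro ⟨w, hw, hpre⟩
          simp only [wordsOf, List.mem_append, List.mem_map] at hw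
          rcases hw with (hw | ⟨w', hw', rfl⟩) | hw
          · exfalso
            have hwc : w = [c] := by
              by_cases h : term = true
              · simpa [h] using hw
              · simp [h] at hw
            subst hwc
            exact hcx (List.cons_prefix_cons.mp hpre).1
          · exact absurd (List.cons_prefix_cons.mp hpre).1 hcx
          · exact ⟨w, hw, hpre⟩

-- the concrete trie is well-formed and stores exactly the indicators (trie traversal order)
set_option maxRecDepth 10000 in
theorem trieRoot_wf : trieWF trieRoot = true := by
  simp [trieRoot, fileIndicators_B, trieInsert, trieWF, chainChars]

def wordsLit : List (List Char) :=
  (["load_file", "into outfile", "into dumpfile",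
    "xp_cmdshell", "sp_oacreate", "sp_oamethod", "sys_exec",
    "readfile", "writefile", "pg_read_file", "pg_stat_file"] : List String).map String.toList

set_option maxRecDepth 10000 in
theorem trieRoot_words : wordsOf trieRoot = wordsLit := by
  simp [trieRoot, fileIndicators_B, trieInsert, wordsOf, wordsLit]

theorem wordsLit_mem (w : List Char) : w ∈ wordsLit ↔ w ∈ fileIndicators_A.map String.toList :=
  List.Perm.mem_iff (by decide)

theorem runFrom_root (l : List Char) :
    runFrom trieRoot l = fileIndicators_A.any fun ind => PySem.Chars.startswith l ind.toList := by
  rw [Bool.eq_iff_iff, runFrom_iff _ _ trieRoot_wf, trieRoot_words]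
  simp only [List.any_eq_true]
  constructor
  · rintro ⟨w, hw, hpre⟩
    obtain ⟨ind, hind, rfl⟩ := List.mem_map.mp ((wordsLit_mem w).mp hw)
    exact ⟨ind, hind, (PySem.Chars.startswith_iff _ _).2 hpre⟩
  · rintro ⟨ind, hind, hst⟩
    exact ⟨ind.toList, (wordsLit_mem _).mpr (List.mem_map.mpr ⟨ind, hind, rfl⟩),
      (PySem.Chars.startswith_iff _ _).1 hst⟩

-- ===== VERDICT (by name: the statement is the Claim_ definition above) =====
theorem detect_file_access_spec : Claim_equal_detect_file_access := by
  intro payload response _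
  unfold Spec_detect_file_access detect_file_access detect_file_access_alt
  rw [detectLoop_A_eq_any]
  set s := PySem.Chars.lower payload.toList
  -- rewrite each indicator's test as a scan, then swap the two 'any's into B's shape
  have hmain : fileIndicators_A.any (fun ind => PySem.Chars.isIn (PySem.Chars.lower ind.toList) s)
      = fileIndicators_A.any (fun ind =>
          (List.range s.length).any fun i => PySem.Chars.startswith (s.drop i) ind.toList) := by
    rw [Bool.eq_iff_iff]
    simp only [List.any_eq_true]
    constructor
    · rintro ⟨ind, hind, h⟩
      obtain ⟨hlow, hne⟩ := indicators_norm ind hind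
      rw [hlow, isIn_eq_scan _ _ hne] at h
      exact ⟨ind, hind, by simpa using h⟩
    · rintro ⟨ind, hind, h⟩
      obtain ⟨hlow, hne⟩ := indicators_norm ind hind
      refine ⟨ind, hind, ?_⟩
      rw [hlow, isIn_eq_scan _ _ hne]
      simpa using h
  rw [hmain]
  rw [Bool.eq_iff_iff]
  simp only [List.any_eq_true, List.mem_range, runFrom_root]
  constructor
  · rintro ⟨ind, hind, i, hi, hst⟩; exact ⟨i, hi, ind, hind, hst⟩
  · rintro ⟨i, hi, ind, hind, hst⟩; exact ⟨ind, hind, i, hi, hst⟩
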